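-- pv_equiv track=rewrite | github.com/matteokfg/Cifra_inclinada | python_code/criptografa_cifra_inclinada.py | falsos_underlines_String
-- ===== SOURCE A (Python) =====
-- def falsos_underlines_String(string, numberOfRows):
--     """Adiciona os falsos underlines na string.
--
--     Parametros:
--     string -- frase que vai ser modificada com underlines extras, que nao estavam na inicial.
--     numberOfRows -- inteiro com a quantidade de linhas.
--
--     Retorna:
--     string -- frase modificada.
--     bool -- se for necessario modificar, sera False. Se nao foi, True.
--     """
--
--     if (len(string) % numberOfRows == 0):
--         booleano = True
--     else:
--         while len(string) % numberOfRows != 0: # coloca underlines no final da string para que o tamanho fique divisivel pelo numero de linhas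
--             string.append("_")
--         booleano = False
--     return string, booleano
-- ===== SOURCE B (Python) =====
-- def falsos_underlines_String(string, numberOfRows):
--     pad = (-len(string)) % abs(numberOfRows)
--     if pad:
--         string.extend(["_"] * pad)
--     return string, pad == 0
-- ===== Notes on version B (the rewrite author's own statement) =====
-- stated objective: idiomatic
-- what changed: Replaces the one-append-per-iteration while loop (with a modulus recomputed each pass) by a closed-form pad count (-len) % abs(numberOfRows) and a single extend.
import Mathlib
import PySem

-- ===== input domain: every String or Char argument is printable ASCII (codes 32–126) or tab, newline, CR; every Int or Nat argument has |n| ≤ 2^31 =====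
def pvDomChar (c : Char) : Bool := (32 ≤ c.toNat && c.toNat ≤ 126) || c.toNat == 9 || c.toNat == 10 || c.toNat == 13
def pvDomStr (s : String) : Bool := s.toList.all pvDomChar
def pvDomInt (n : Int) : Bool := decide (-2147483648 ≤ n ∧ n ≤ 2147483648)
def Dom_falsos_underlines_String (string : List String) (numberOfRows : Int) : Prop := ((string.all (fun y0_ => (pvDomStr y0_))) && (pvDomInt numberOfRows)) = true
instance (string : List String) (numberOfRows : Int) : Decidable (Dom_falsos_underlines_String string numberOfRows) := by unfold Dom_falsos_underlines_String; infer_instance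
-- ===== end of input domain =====

-- B replaces A's append-one-underscore-at-a-time while loop by a closed-form pad count and a
-- single extend; both Pythons mutate the argument list in place, and the equivalence proved
-- here is about the returned (list, bool) pair.

-- ===== PORT A =====
-- A's while loop; the fuel numberOfRows.natAbs is a totality guard only (the loop appends at
-- most |numberOfRows| - 1 underscores before the length becomes divisible).
def pyWhilePad (fuel : Nat) (s : List String) (numberOfRows : Int) : List String :=
  match fuel with
  | 0 => s
  | f + 1 =>
      if PySem.Int.mod (s.length : Int) numberOfRows ≠ 0 then
        pyWhilePad f (s ++ ["_"]) numberOfRows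
      else s

def falsos_underlines_String (string : List String) (numberOfRows : Int) : List String × Bool :=
  if PySem.Int.mod (string.length : Int) numberOfRows = 0 then
    (string, true)
  else
    (pyWhilePad numberOfRows.natAbs string numberOfRows, false)

-- ===== PORT B =====
def falsos_underlines_String_alt (string : List String) (numberOfRows : Int) : List String × Bool :=
  let pad := PySem.Int.mod (-(string.length : Int)) (numberOfRows.natAbs : Int)
  ((if pad ≠ 0 then string ++ List.replicate pad.toNat "_" else string), pad == 0)

-- ===== PRECONDITION & SPEC =====
-- Pre_ excludes only numberOfRows = 0, on which Python A raises ZeroDivisionError.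
def Pre_falsos_underlines_String (string : List String) (numberOfRows : Int) : Prop :=
  numberOfRows ≠ 0
instance (string : List String) (numberOfRows : Int) : Decidable (Pre_falsos_underlines_String string numberOfRows) := by unfold Pre_falsos_underlines_String; infer_instance

def pvWitness_falsos_underlines_String : List String × Int := (["a", "b", "c"], 2)

def Spec_falsos_underlines_String (string : List String) (numberOfRows : Int) (out : List String × Bool) : Prop := out = falsos_underlines_String_alt string numberOfRows
instance (string : List String) (numberOfRows : Int) (out : List String × Bool) : Decidable (Spec_falsos_underlines_String string numberOfRows out) := by unfold Spec_falsos_underlines_String; infer_instance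

-- ===== CLAIM (what is proved, stated in full; the proofs are below) =====
def Claim_equal_falsos_underlines_String : Prop := ∀ (string : List String) (numberOfRows : Int), Dom_falsos_underlines_String string numberOfRows → Pre_falsos_underlines_String string numberOfRows → Spec_falsos_underlines_String string numberOfRows (falsos_underlines_String string numberOfRows)

-- ===== LEMMAS AND PROOFS =====

-- Python's `len % rows == 0` is divisibility by |rows| (PySem mod is the floor mod).
lemma pymod_zero_iff (L rows : Int) :
    PySem.Int.mod L rows = 0 ↔ ((rows.natAbs : Int) ∣ L) := by
  rw [PySem.Int.mod_eq_zero_iff_dvd, Int.natAbs_dvd]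

-- The while loop appends exactly pad = (-len) mod |rows| underscores, given enough fuel.
lemma pyWhilePad_eq (rows : Int) (hrows : rows ≠ 0) :
    ∀ (f : Nat) (s : List String),
      ((-(s.length : Int)) % (rows.natAbs : Int)).toNat ≤ f →
      pyWhilePad f s rows
        = s ++ List.replicate ((-(s.length : Int)) % (rows.natAbs : Int)).toNat "_" := by
  have hk : 0 < (rows.natAbs : Int) := by
    have := Int.natAbs_pos.mpr hrows; exact_mod_cast this
  intro f
  induction f with
  | zero =>
      intro s hle
      have h0 : ((-(s.length : Int)) % (rows.natAbs : Int)).toNat = 0 := Nat.le_zero.mp hle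
      simp only [pyWhilePad, h0, List.replicate_zero, List.append_nil]
  | succ f ih =>
      intro s hle
      set k : Int := (rows.natAbs : Int) with hkdef
      by_cases hdvd : k ∣ (s.length : Int)
      · -- divisible: loop condition false, and pad = 0
        have hmod0 : PySem.Int.mod (s.length : Int) rows = 0 := (pymod_zero_iff _ _).mpr hdvd
        have hpad0 : (-(s.length : Int)) % k = 0 :=
          Int.emod_eq_zero_of_dvd (Dvd.dvd.neg_right hdvd)
        simp only [pyWhilePad, hmod0, ne_eq, not_true_eq_false, if_false, hpad0,
          Int.toNat_zero, List.replicate_zero, List.append_nil]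
      · -- not divisible: loop condition true; one append decreases the pad count by one
        have hmodne : PySem.Int.mod (s.length : Int) rows ≠ 0 := fun h => hdvd ((pymod_zero_iff _ _).mp h)
        have hne : (-(s.length : Int)) % k ≠ 0 := by
          intro h
          exact hdvd (Int.dvd_neg.mp (Int.dvd_of_emod_eq_zero h))
        have hnonneg : 0 ≤ (-(s.length : Int)) % k := Int.emod_nonneg _ (by omega)
        have hlt : (-(s.length : Int)) % k < k := Int.emod_lt_of_pos _ hk
        have hlen : ((s ++ ["_"]).length : Int) = (s.length : Int) + 1 := by simp
        have hstep : (-(((s ++ ["_"]).length : Int))) % k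
            = (-(s.length : Int)) % k - 1 := by
          rw [hlen]
          have hq := Int.ediv_add_emod (-(s.length : Int)) k
          have h1 : (-((s.length : Int) + 1))
              = ((-(s.length : Int)) % k - 1) + k * ((-(s.length : Int)) / k) := by omega
          rw [h1, Int.add_mul_emod_self_left]
          exact Int.emod_eq_of_lt (by omega) (by omega)
        have hle' : ((-(((s ++ ["_"]).length : Int))) % k).toNat ≤ f := by
          rw [hstep]; omega
        have hrec := ih (s ++ ["_"]) hle'
        rw [hstep] at hrec
        have htoNat : ((-(s.length : Int)) % k - 1).toNat + 1
            = ((-(s.length : Int)) % k).toNat := by omega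
        calc pyWhilePad (f + 1) s rows
            = pyWhilePad f (s ++ ["_"]) rows := by simp [pyWhilePad, hmodne]
          _ = s ++ ["_"] ++ List.replicate (((-(s.length : Int)) % k - 1)).toNat "_" := hrec
          _ = s ++ List.replicate ((-(s.length : Int)) % k).toNat "_" := by
              rw [List.append_assoc, ← htoNat, List.replicate_succ]
              rfl

-- ===== VERDICT (by name: the statement is the Claim_ definition above) =====
theorem falsos_underlines_String_spec : Claim_equal_falsos_underlines_String := by
  intro string numberOfRows _hdom hpre
  unfold Spec_falsos_underlines_String falsos_underlines_String falsos_underlines_String_alt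
  have hk : 0 < (numberOfRows.natAbs : Int) := by
    have := Int.natAbs_pos.mpr hpre; exact_mod_cast this
  have hpadmod : PySem.Int.mod (-(string.length : Int)) (numberOfRows.natAbs : Int)
      = (-(string.length : Int)) % (numberOfRows.natAbs : Int) :=
    PySem.Int.mod_eq_emod_of_pos hk
  by_cases hdvd : (numberOfRows.natAbs : Int) ∣ (string.length : Int)
  · have hmod0 : PySem.Int.mod (string.length : Int) numberOfRows = 0 :=
      (pymod_zero_iff _ _).mpr hdvd
    have hpad0 : (-(string.length : Int)) % (numberOfRows.natAbs : Int) = 0 :=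
      Int.emod_eq_zero_of_dvd (Dvd.dvd.neg_right hdvd)
    rw [if_pos hmod0]
    simp only [hpadmod, hpad0]
    simp
  · have hmodne : PySem.Int.mod (string.length : Int) numberOfRows ≠ 0 :=
      fun h => hdvd ((pymod_zero_iff _ _).mp h)
    have hpadne : (-(string.length : Int)) % (numberOfRows.natAbs : Int) ≠ 0 := by
      intro h; exact hdvd (Int.dvd_neg.mp (Int.dvd_of_emod_eq_zero h))
    have hfuel : ((-(string.length : Int)) % (numberOfRows.natAbs : Int)).toNat
        ≤ numberOfRows.natAbs := by
      have hlt : (-(string.length : Int)) % (numberOfRows.natAbs : Int)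
          < (numberOfRows.natAbs : Int) := Int.emod_lt_of_pos _ hk
      have hnn : 0 ≤ (-(string.length : Int)) % (numberOfRows.natAbs : Int) :=
        Int.emod_nonneg _ (by omega)
      omega
    have hloop := pyWhilePad_eq numberOfRows hpre numberOfRows.natAbs string hfuel
    have hdvd' : ¬ numberOfRows ∣ (string.length : Int) := fun h => hdvd (Int.natAbs_dvd.mpr h)
    rw [if_neg hmodne, hloop]
    simp only [hpadmod]
    rw [if_pos hpadne]
    simp [hdvd']
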